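-- pv_equiv track=rewrite | github.com/dobermanch/dev-quests | src/python/problems/can_place_flowers_test.py | Solution
-- ===== SOURCE A (Python) =====
-- def Solution(flowerbed: list[int], n: int) -> bool:
--     flowerbed = [0] + flowerbed + [0]
--     left = n
--     plot = 1
--
--     while left > 0 and plot < len(flowerbed) - 1:
--         if flowerbed[plot] == 1:
--             plot += 1
--         elif flowerbed[plot - 1] == 0 and flowerbed[plot + 1] == 0:
--             flowerbed[plot] = 1
--             plot += 1
--             left -= 1
--
--         plot += 1
--
--     return left == 0
-- ===== SOURCE B (Python) =====
-- def Solution(flowerbed: list[int], n: int) -> bool: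
--     ext = [0] + flowerbed + [0]
--     cand = [v != 1 and p == 0 and q == 0 for p, v, q in zip(ext, ext[1:], ext[2:])]
--     total = 0
--     run = 0
--     for c in cand:
--         if c:
--             run += 1
--         else:
--             total += (run + 1) // 2
--             run = 0
--     total += (run + 1) // 2
--     return 0 <= n <= total
-- ===== Notes on version B (the rewrite author's own statement) =====
-- stated objective: alternative
-- what changed: Replaces A's in-place greedy planting simulation (mutating the padded bed, jumping the index, early exit after n placements) with a staged computation: a candidate mask built by zipping the padded bed with its two shifts, then run-length arithmetic summing ceil(len/2) over maximal candidate runs, finally comparing 0 <= n <= total.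
import Mathlib
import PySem

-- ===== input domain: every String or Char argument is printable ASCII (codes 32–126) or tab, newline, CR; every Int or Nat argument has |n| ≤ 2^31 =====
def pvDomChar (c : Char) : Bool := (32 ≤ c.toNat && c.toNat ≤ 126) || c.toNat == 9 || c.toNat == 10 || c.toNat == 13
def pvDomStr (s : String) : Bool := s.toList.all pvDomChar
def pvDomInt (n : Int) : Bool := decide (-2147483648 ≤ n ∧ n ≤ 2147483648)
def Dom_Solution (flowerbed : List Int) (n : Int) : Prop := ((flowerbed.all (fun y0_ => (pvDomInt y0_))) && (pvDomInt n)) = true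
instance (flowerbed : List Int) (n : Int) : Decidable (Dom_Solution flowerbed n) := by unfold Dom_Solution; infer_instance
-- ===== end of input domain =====

-- B replaces A's in-place greedy planting simulation with a staged computation:
-- a candidate mask from zipping the padded bed with its two shifts, then run-length
-- arithmetic summing ceil(len/2) over maximal candidate runs (objective: alternative).

-- ===== PORT A =====
-- A's while loop: state = (mutated padded bed a, left, plot); plot only ever increases,
-- stays ≥ 1, and the loop only reads indices plot-1, plot, plot+1, all in range while
-- the guard holds, so getD with default 0 reads exactly what Python reads. The fuel
-- argument only makes the recursion structural: plot grows by ≥ 1 per step, so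
-- fuel = length of the padded bed is never exhausted before the guard fails.
def SolutionLoop (a : List Int) (left : Int) (plot : Nat) : Nat → Int
  | 0 => left
  | fuel + 1 =>
    if 0 < left ∧ plot < a.length - 1 then
      if a.getD plot 0 = 1 then
        SolutionLoop a left (plot + 2) fuel
      else if a.getD (plot - 1) 0 = 0 ∧ a.getD (plot + 1) 0 = 0 then
        SolutionLoop (a.set plot 1) (left - 1) (plot + 2) fuel
      else
        SolutionLoop a left (plot + 1) fuel
    else left

def Solution (flowerbed : List Int) (n : Int) : Bool :=
  SolutionLoop (0 :: flowerbed ++ [0]) n 1 (flowerbed.length + 2) == 0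

-- ===== PORT B =====
-- Source B's `zip(ext, ext[1:], ext[2:])`: the slices `ext[k:]` with k ≥ 0 are exactly
-- `List.drop k` here; Python's 3-ary zip is the nested pair zip.
def candTriples (ext : List Int) : List (Int × Int × Int) :=
  ext.zip ((ext.drop 1).zip (ext.drop 2))

-- Source B's boolean `v != 1 and p == 0 and q == 0` for a triple (p, v, q)
def candFn (t : Int × Int × Int) : Bool :=
  decide (t.2.1 ≠ 1) && decide (t.1 = 0) && decide (t.2.2 = 0)

-- Source B's for loop over cand: state = (total, run); (run+1)//2 is Python floor division
def runStep (tl : Int × Int) (c : Bool) : Int × Int :=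
  if c then (tl.1, tl.2 + 1) else (tl.1 + PySem.Int.floordiv (tl.2 + 1) 2, 0)

def Solution_alt (flowerbed : List Int) (n : Int) : Bool :=
  let ext := 0 :: flowerbed ++ [0]
  let cand := (candTriples ext).map candFn
  let s := cand.foldl runStep (0, 0)
  decide (0 ≤ n ∧ n ≤ s.1 + PySem.Int.floordiv (s.2 + 1) 2)

-- ===== PRECONDITION & SPEC =====
def Spec_Solution (flowerbed : List Int) (n : Int) (out : Bool) : Prop := out = Solution_alt flowerbed n
instance (flowerbed : List Int) (n : Int) (out : Bool) : Decidable (Spec_Solution flowerbed n out) := by unfold Spec_Solution; infer_instance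

-- ===== CLAIM (what is proved, stated in full; the proofs are below) =====
def Claim_equal_Solution : Prop := ∀ (flowerbed : List Int) (n : Int), Dom_Solution flowerbed n → Spec_Solution flowerbed n (Solution flowerbed n)

-- ===== LEMMAS AND PROOFS =====

-- Greedy count of A's placements, mutation-free: state = (prev cell effectively empty).
-- Proof-internal bridge between the two ports.
def altCount (cells : List Int) (prevZero : Bool) : Int :=
  match cells with
  | [] => 0
  | v :: rest =>
    if v ≠ 1 ∧ prevZero = true ∧ rest.headD 0 = 0 then 1 + altCount rest false
    else altCount rest (v == 0)

-- Mutation-free reformulation of A's loop over the suffix of original cells: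
-- prev is a[plot-1], cells = a[plot .. m] (right pad handled by headD 0).
def pureLoop (prev : Int) (cells : List Int) (left : Int) : Int :=
  match cells with
  | [] => left
  | v :: rest =>
    if left ≤ 0 then left
    else if v = 1 then
      match rest with
      | [] => left
      | w :: rest' => pureLoop w rest' left
    else if prev = 0 ∧ rest.headD 0 = 0 then
      match rest with
      | [] => left - 1
      | w :: rest' => pureLoop w rest' (left - 1)
    else pureLoop v rest left

theorem getD_append_len (pre l : List Int) (k : Nat) :
    (pre ++ l).getD (pre.length + k) 0 = l.getD k 0 := by
  induction pre with
  | nil => simp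
  | cons x xs ih => simpa [Nat.succ_add] using ih

theorem set_append_len (pre l : List Int) (k : Nat) (x : Int) :
    (pre ++ l).set (pre.length + k) x = pre ++ l.set k x := by
  induction pre with
  | nil => simp
  | cons y ys ih => simpa [Nat.succ_add] using ih

theorem altCount_nonneg (cells : List Int) (pz : Bool) : 0 ≤ altCount cells pz := by
  induction cells generalizing pz with
  | nil => simp [altCount]
  | cons v rest ih =>
    simp only [altCount]
    split
    · have := ih false; omega
    · exact ih _

theorem pureLoop_nonpos (prev : Int) (cells : List Int) (left : Int) (h : left ≤ 0) :
    pureLoop prev cells left = left := by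
  cases cells with
  | nil => rfl
  | cons v rest => rw [pureLoop.eq_def]; simp [h]

theorem pureLoop_cons_else (prev v : Int) (rest : List Int) (left : Int)
    (hpos : ¬ left ≤ 0) (hv : ¬ v = 1) (hnb : ¬ (prev = 0 ∧ rest.headD 0 = 0)) :
    pureLoop prev (v :: rest) left = pureLoop v rest left := by
  rw [pureLoop.eq_def]
  dsimp only []
  rw [if_neg hpos, if_neg hv, if_neg hnb]

theorem SolutionLoop_eq_pure (prev : Int) (cells : List Int) (left : Int) :
    ∀ (fuel : Nat) (pre : List Int), cells.length < fuel →
      SolutionLoop (pre ++ prev :: (cells ++ [0])) left (pre.length + 1) fuel = pureLoop prev cells left := by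
  induction prev, cells, left using pureLoop.induct with
  | case1 prev left =>
    intro fuel pre hf
    cases fuel with
    | zero => simp at hf
    | succ f =>
      rw [SolutionLoop, pureLoop]
      rw [if_neg (fun h => by simp at h <;> omega)]
  | case2 prev left v rest hle =>
    intro fuel pre hf
    cases fuel with
    | zero => simp at hf
    | succ f =>
      rw [SolutionLoop]
      rw [if_neg (fun h => absurd h.1 (by omega))]
      rw [pureLoop.eq_def]; simp [hle]
  | case3 prev left hpos =>
    -- cells = [1]
    intro fuel pre hf
    cases fuel with
    | zero => simp at hf
    | succ f =>
      rw [SolutionLoop]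
      rw [if_pos (by refine ⟨by omega, ?_⟩; simp)]
      have h1 : (pre ++ prev :: (([1] : List Int) ++ [0])).getD (pre.length + 1) 0 = 1 := by
        simpa using getD_append_len pre (prev :: 1 :: [0]) 1
      rw [if_pos h1]
      cases f with
      | zero => simp at hf
      | succ f' =>
        rw [SolutionLoop]
        rw [if_neg (fun h => by simp at h <;> omega)]
        rw [pureLoop.eq_def]; simp [hpos]
  | case4 prev left hpos w rest' ih =>
    -- cells = 1 :: w :: rest'
    intro fuel pre hf
    cases fuel with
    | zero => simp at hf
    | succ f =>
      rw [SolutionLoop]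
      rw [if_pos (by refine ⟨by omega, ?_⟩; simp)]
      have h1 : (pre ++ prev :: ((1 :: w :: rest' : List Int) ++ [0])).getD (pre.length + 1) 0 = 1 := by
        simpa using getD_append_len pre (prev :: 1 :: w :: rest' ++ [0]) 1
      rw [if_pos h1]
      have hre : pre ++ prev :: ((1 :: w :: rest' : List Int) ++ [0]) =
          (pre ++ [prev, 1]) ++ w :: (rest' ++ [0]) := by simp
      have hlen : pre.length + 1 + 2 = (pre ++ [prev, 1]).length + 1 := by simp
      have hfn : rest'.length < f := by simp at hf; omega
      rw [hre, hlen, ih f (pre ++ [prev, 1]) hfn]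
      conv_rhs => rw [pureLoop.eq_def]
      simp [hpos]
  | case5 prev left v hpos hv hnb =>
    -- cells = [v], v ≠ 1, prev = 0 (next = right pad = 0)
    intro fuel pre hf
    cases fuel with
    | zero => simp at hf
    | succ f =>
      rw [SolutionLoop]
      rw [if_pos (by refine ⟨by omega, ?_⟩; simp)]
      have h1 : (pre ++ prev :: (([v] : List Int) ++ [0])).getD (pre.length + 1) 0 = v := by
        simpa using getD_append_len pre (prev :: v :: [0]) 1
      rw [if_neg (by rw [h1]; exact hv)]
      have h0 : (pre ++ prev :: (([v] : List Int) ++ [0])).getD (pre.length + 1 - 1) 0 = prev := by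
        rw [show pre.length + 1 - 1 = pre.length + 0 by omega]
        simpa using getD_append_len pre (prev :: v :: [0]) 0
      have h2 : (pre ++ prev :: (([v] : List Int) ++ [0])).getD (pre.length + 1 + 1) 0 = 0 := by
        rw [show pre.length + 1 + 1 = pre.length + 2 by omega]
        simpa using getD_append_len pre (prev :: v :: [0]) 2
      rw [if_pos (by rw [h0, h2]; exact ⟨hnb.1, rfl⟩)]
      cases f with
      | zero => simp at hf
      | succ f' =>
        rw [SolutionLoop]
        rw [if_neg (fun h => by simp at h <;> omega)]
        rw [pureLoop.eq_def]; simp [hpos, hv, hnb.1]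
  | case6 prev left v hpos hv w rest' hnb ih =>
    -- cells = v :: w :: rest', v ≠ 1, prev = 0 ∧ w = 0
    intro fuel pre hf
    cases fuel with
    | zero => simp at hf
    | succ f =>
      have hw : w = 0 := by simpa using hnb.2
      rw [SolutionLoop]
      rw [if_pos (by refine ⟨by omega, ?_⟩; simp)]
      have h1 : (pre ++ prev :: ((v :: w :: rest') ++ [0])).getD (pre.length + 1) 0 = v := by
        simpa using getD_append_len pre (prev :: v :: w :: rest' ++ [0]) 1
      rw [if_neg (by rw [h1]; exact hv)]
      have h0 : (pre ++ prev :: ((v :: w :: rest') ++ [0])).getD (pre.length + 1 - 1) 0 = prev := by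
        rw [show pre.length + 1 - 1 = pre.length + 0 by omega]
        simpa using getD_append_len pre (prev :: v :: w :: rest' ++ [0]) 0
      have h2 : (pre ++ prev :: ((v :: w :: rest') ++ [0])).getD (pre.length + 1 + 1) 0 = w := by
        rw [show pre.length + 1 + 1 = pre.length + 2 by omega]
        simpa using getD_append_len pre (prev :: v :: w :: rest' ++ [0]) 2
      rw [if_pos (by rw [h0, h2]; exact ⟨hnb.1, hw⟩)]
      have hset : (pre ++ prev :: ((v :: w :: rest') ++ [0])).set (pre.length + 1) 1 =
          (pre ++ [prev, 1]) ++ w :: (rest' ++ [0]) := by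
        have := set_append_len pre (prev :: v :: w :: rest' ++ [0]) 1 1
        simpa using this
      have hlen : pre.length + 1 + 2 = (pre ++ [prev, 1]).length + 1 := by simp
      have hfn : rest'.length < f := by simp at hf; omega
      rw [hset, hlen, ih f (pre ++ [prev, 1]) hfn]
      conv_rhs => rw [pureLoop.eq_def]
      simp [hpos, hv, hnb.1, hw]
  | case7 prev left v rest hpos hv hnb ih =>
    -- v ≠ 1, ¬(prev = 0 ∧ next = 0)
    intro fuel pre hf
    cases fuel with
    | zero => simp at hf
    | succ f =>
      rw [SolutionLoop]
      rw [if_pos (by refine ⟨by omega, ?_⟩; simp)]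
      have h1 : (pre ++ prev :: ((v :: rest) ++ [0])).getD (pre.length + 1) 0 = v := by
        simpa using getD_append_len pre (prev :: v :: rest ++ [0]) 1
      rw [if_neg (by rw [h1]; exact hv)]
      have h0 : (pre ++ prev :: ((v :: rest) ++ [0])).getD (pre.length + 1 - 1) 0 = prev := by
        rw [show pre.length + 1 - 1 = pre.length + 0 by omega]
        simpa using getD_append_len pre (prev :: v :: rest ++ [0]) 0
      have h2 : (pre ++ prev :: ((v :: rest) ++ [0])).getD (pre.length + 1 + 1) 0 = rest.headD 0 := by
        rw [show pre.length + 1 + 1 = pre.length + 2 by omega,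
          getD_append_len pre (prev :: ((v :: rest) ++ [0])) 2]
        cases rest <;> simp
      rw [if_neg (by rw [h0, h2]; exact hnb)]
      have hre : pre ++ prev :: ((v :: rest) ++ [0]) = (pre ++ [prev]) ++ v :: (rest ++ [0]) := by simp
      have hlen : pre.length + 1 + 1 = (pre ++ [prev]).length + 1 := by simp
      have hfn : rest.length < f := by simp at hf; omega
      rw [hre, hlen, ih f (pre ++ [prev]) hfn, pureLoop_cons_else prev v rest left hpos hv hnb]

theorem pureLoop_eq_max (prev : Int) (cells : List Int) (left : Int) :
    0 < left → pureLoop prev cells left = max 0 (left - altCount cells (prev == 0)) := by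
  induction prev, cells, left using pureLoop.induct with
  | case1 prev left =>
    intro hl; simp [pureLoop, altCount]; omega
  | case2 prev left v rest hle =>
    intro hl; omega
  | case3 prev left hpos =>
    intro hl
    simp [pureLoop, hpos, altCount]
    omega
  | case4 prev left hpos w rest' ih =>
    intro hl
    have h1 : altCount (1 :: w :: rest') (prev == 0) = altCount rest' (w == 0) := by
      simp [altCount]
    rw [h1]
    simp only [pureLoop, if_neg hpos]
    exact ih hl
  | case5 prev left v hpos hv hnb =>
    intro hl
    simp [pureLoop, hv, hpos, hnb.1, altCount]
    omega
  | case6 prev left v hpos hv w rest' hnb ih =>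
    intro hl
    have hw : w = 0 := by simpa using hnb.2
    have hpz : (prev == 0) = true := by simp [hnb.1]
    have h1 : altCount (v :: w :: rest') (prev == 0) = 1 + altCount rest' (w == 0) := by
      simp [altCount, hv, hpz, hw]
    rw [h1]
    simp only [pureLoop, if_neg hpos, if_neg hv, if_pos hnb]
    by_cases h2 : 0 < left - 1
    · rw [ih h2]; omega
    · rw [show left - 1 = 0 by omega, pureLoop_nonpos _ _ _ le_rfl]
      have := altCount_nonneg rest' (w == 0)
      omega
  | case7 prev left v rest hpos hv hnb ih =>
    intro hl
    have h1 : altCount (v :: rest) (prev == 0) = altCount rest (v == 0) := by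
      have hcond : ¬ (v ≠ 1 ∧ (prev == 0) = true ∧ rest.headD 0 = 0) := by
        rintro ⟨_, h2, h3⟩
        exact hnb ⟨by simpa using h2, h3⟩
      simp only [altCount]
      rw [if_neg hcond]
    rw [h1, pureLoop_cons_else prev v rest left hpos hv hnb]
    exact ih hl

-- B side: recursive characterisation of the candidate mask
def candList (pe : Bool) : List Int → List Bool
  | [] => []
  | v :: rest => (decide (v ≠ 1) && pe && decide (rest.headD 0 = 0)) :: candList (v == 0) rest

-- B side: run-length total as a recursion (what the fold computes)
def runTotal (L : Nat) : List Bool → Int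
  | [] => (((L + 1) / 2 : Nat) : Int)
  | true :: bs => runTotal (L + 1) bs
  | false :: bs => (((L + 1) / 2 : Nat) : Int) + runTotal 0 bs

theorem cand_eq (cells : List Int) : ∀ (prev : Int),
    (candTriples (prev :: cells ++ [0])).map candFn = candList (prev == 0) cells := by
  induction cells with
  | nil =>
    intro prev
    simp [candTriples, candList]
  | cons v rest ih =>
    intro prev
    cases rest with
    | nil =>
      by_cases h : prev = 0 <;>
        simp [candTriples, candList, candFn, h]
    | cons w rest' =>
      have hstep : candTriples (prev :: (v :: w :: rest') ++ [0]) =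
          (prev, v, w) :: candTriples (v :: (w :: rest') ++ [0]) := by
        simp [candTriples]
      rw [show prev :: (v :: w :: rest') ++ [0] = prev :: ((v :: w :: rest') ++ [0]) by simp] at *
      rw [hstep, List.map_cons, ih v]
      have hbe : ((prev == 0) : Bool) = decide (prev = 0) := by
        by_cases h : prev = 0 <;> simp [h]
      simp [candList, candFn, hbe]

theorem floordiv_two_natCast (m : Nat) :
    PySem.Int.floordiv ((m : Int)) 2 = ((m / 2 : Nat) : Int) := by
  exact_mod_cast PySem.Int.floordiv_natCast m 2

theorem fold_runTotal (bs : List Bool) : ∀ (t : Int) (L : Nat),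
    (bs.foldl runStep (t, (L : Int))).1 +
      PySem.Int.floordiv ((bs.foldl runStep (t, (L : Int))).2 + 1) 2 = t + runTotal L bs := by
  induction bs with
  | nil =>
    intro t L
    simp only [List.foldl_nil, runTotal]
    rw [show ((L : Int) + 1) = ((L + 1 : Nat) : Int) by omega, floordiv_two_natCast]
  | cons c bs ih =>
    intro t L
    cases c with
    | true =>
      simp only [List.foldl_cons, runStep, if_true, runTotal]
      rw [show ((L : Int) + 1) = ((L + 1 : Nat) : Int) by omega]
      exact ih t (L + 1)
    | false =>
      simp only [List.foldl_cons, runStep, runTotal]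
      rw [if_neg (by simp)]
      rw [show ((L : Int) + 1) = ((L + 1 : Nat) : Int) by omega, floordiv_two_natCast]
      have h := ih (t + (((L + 1) / 2 : Nat) : Int)) 0
      simp only [Nat.cast_zero] at h
      rw [h]
      ring

theorem altCount_runTotal (cells : List Int) : ∀ (L : Nat) (pe : Bool),
    altCount cells (decide (L % 2 = 0) && pe) =
      runTotal L (candList pe cells) - (((L + 1) / 2 : Nat) : Int) := by
  induction cells with
  | nil =>
    intro L pe
    simp [altCount, candList, runTotal]
  | cons v rest ih =>
    intro L pe
    have ih0 := ih 0 (v == 0)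
    simp only [Nat.zero_mod, decide_true, Bool.true_and] at ih0
    by_cases hcond : v ≠ 1 ∧ pe = true ∧ rest.headD 0 = 0
    · obtain ⟨hv, hpe, hh⟩ := hcond
      have hh' : rest.head?.getD 0 = 0 := by cases rest <;> simpa using hh
      have hc : (decide (v ≠ 1) && pe && decide (rest.headD 0 = 0)) = true := by
        simp [hv, hpe, hh']
      simp only [candList, hc, runTotal, altCount]
      have ihn := ih (L + 1) (v == 0)
      rcases Nat.mod_two_eq_zero_or_one L with hL | hL
      · rw [if_pos ⟨hv, by simp [hL, hpe], by cases rest <;> simpa using hh⟩]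
        rw [show decide ((L + 1) % 2 = 0) = false by simp; omega] at ihn
        simp only [Bool.false_and] at ihn
        omega
      · rw [if_neg (by rintro ⟨_, h, _⟩; simp [hL] at h)]
        rw [show decide ((L + 1) % 2 = 0) = true by simp; omega] at ihn
        simp only [Bool.true_and] at ihn
        omega
    · have hc : (decide (v ≠ 1) && pe && decide (rest.headD 0 = 0)) = false := by
        by_cases hv : v = 1
        · simp [hv]
        · by_cases hpe : pe = true
          · have hh : ¬ rest.headD 0 = 0 := fun hh => hcond ⟨hv, hpe, hh⟩
            have hh' : ¬ rest.head?.getD 0 = 0 := by cases rest <;> simpa using hh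
            simp [hpe, hh']
          · have hf : pe = false := by revert hpe; cases pe <;> simp
            simp [hf]
      simp only [candList, hc, runTotal, altCount]
      rw [if_neg (by
        rintro ⟨hv, hp, hh⟩
        rw [Bool.and_eq_true] at hp
        exact hcond ⟨hv, hp.2, by cases rest <;> simpa using hh⟩)]
      omega

theorem alt_total_eq (fb : List Int) :
    (((candTriples (0 :: fb ++ [0])).map candFn).foldl runStep (0, 0)).1 +
      PySem.Int.floordiv ((((candTriples (0 :: fb ++ [0])).map candFn).foldl runStep (0, 0)).2 + 1) 2 =
      altCount fb true := by
  rw [cand_eq fb 0]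
  have h0 : ((0 : Int) == 0) = true := by simp
  rw [h0]
  have hf := fold_runTotal (candList true fb) 0 0
  simp only [Nat.cast_zero] at hf
  rw [hf]
  have ha := altCount_runTotal fb 0 true
  simp only [Nat.zero_mod, decide_true, Bool.true_and] at ha
  rw [ha]
  norm_num

theorem Solution_spec : Claim_equal_Solution := by
  intro fb n _
  unfold Spec_Solution Solution Solution_alt
  have hA : SolutionLoop (0 :: fb ++ [0]) n 1 (fb.length + 2) = pureLoop 0 fb n := by
    simpa using SolutionLoop_eq_pure 0 fb n (fb.length + 2) [] (by omega)
  rw [hA]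
  simp only []
  rw [alt_total_eq fb]
  have hC := altCount_nonneg fb true
  by_cases hn : 0 < n
  · rw [pureLoop_eq_max 0 fb n hn]
    rw [show ((0 : Int) == 0) = true by simp]
    by_cases h2 : n ≤ altCount fb true
    · rw [show max 0 (n - altCount fb true) = 0 by omega]
      simp [h2]
      omega
    · rw [show max 0 (n - altCount fb true) = n - altCount fb true by omega]
      simp [h2]
      omega
  · rw [pureLoop_nonpos 0 fb n (by omega)]
    by_cases h0 : n = 0
    · subst h0; simp [hC]
    · have hneg : ¬ (0 : Int) ≤ n := by omega
      simp [h0, hneg]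

-- ===== VERDICT: Solution_spec above proves Claim_equal_Solution =====
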